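-- pv_equiv track=rewrite | github.com/FilipDavid-Liviu/MultimodalContentSummarizer | server/feature_extractor.py | calculate_reread_frequency
-- ===== SOURCE A (Python) =====
-- from typing import List, Dict, Any
--
-- def calculate_reread_frequency(gaze_points: List[Dict]) -> int:
--     """
--     Count how many times user returns to a previously visited AOI.
--
--     Parameters:
--     - gaze_points: List of dicts with 'aoi' key
--
--     Returns:
--     - Re-read frequency count
--     """
--     if len(gaze_points) < 2:
--         return 0
--
--     visited_aois = []
--     reread_count = 0
--
--     for point in gaze_points:
--         aoi = point.get('aoi', 'NONE')
--         if aoi == 'NONE':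
--             continue
--
--         if aoi in visited_aois:
--             reread_count += 1
--         else:
--             visited_aois.append(aoi)
--
--     return reread_count
-- ===== SOURCE B (Python) =====
-- def calculate_reread_frequency(gaze_points):
--     """
--     Count how many times user returns to a previously visited AOI.
--
--     Rereads = number of valid AOI observations minus number of distinct AOIs.
--     """
--     aois = [a for a in (p.get('aoi', 'NONE') for p in gaze_points) if a != 'NONE']
--     return len(aois) - len(set(aois))
-- ===== Notes on version B (the rewrite author's own statement) =====
-- stated objective: simpler
-- what changed: Replaces the explicit loop with a visited-list membership scan and a counter by the identity rereads = number of valid AOI observations minus number of distinct AOIs (len(aois) - len(set(aois))), dropping the redundant len<2 guard.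
import Mathlib
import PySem

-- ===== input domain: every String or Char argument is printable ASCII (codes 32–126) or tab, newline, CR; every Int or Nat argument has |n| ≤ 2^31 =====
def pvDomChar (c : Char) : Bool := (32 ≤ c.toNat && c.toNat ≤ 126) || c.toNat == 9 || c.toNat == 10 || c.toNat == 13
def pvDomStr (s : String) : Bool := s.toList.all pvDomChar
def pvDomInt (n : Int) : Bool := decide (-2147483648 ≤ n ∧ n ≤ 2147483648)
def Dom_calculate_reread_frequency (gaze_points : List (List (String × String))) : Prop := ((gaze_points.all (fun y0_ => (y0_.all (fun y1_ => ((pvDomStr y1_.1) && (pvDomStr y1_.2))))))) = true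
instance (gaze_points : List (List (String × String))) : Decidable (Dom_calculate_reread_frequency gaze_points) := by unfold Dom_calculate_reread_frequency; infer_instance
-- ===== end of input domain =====

-- B changes the algorithm: instead of A's visited-list + counter loop, B counts
-- valid AOI observations and subtracts the number of distinct AOIs (simpler).

-- ===== PORT A =====
-- the loop carries (visited_aois, reread_count); branches in A's order
def calculate_reread_frequency (gaze_points : List (List (String × String))) : Int :=
  if gaze_points.length < 2 then 0
  else
    (gaze_points.foldl
      (fun (s : List String × Int) point =>
        let aoi := (PySem.Dict.mk point).getD "aoi" "NONE"
        if aoi = "NONE" then s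
        else if aoi ∈ s.1 then (s.1, s.2 + 1)
        else (s.1 ++ [aoi], s.2))
      ([], 0)).2

-- ===== PORT B =====
def calculate_reread_frequency_alt (gaze_points : List (List (String × String))) : Int :=
  let aois := (gaze_points.map (fun p => (PySem.Dict.mk p).getD "aoi" "NONE")).filter
      (fun a => a ≠ "NONE")
  (aois.length : Int) - ((PySem.Set.ofList aois).length : Int)

-- ===== PRECONDITION & SPEC =====
def Spec_calculate_reread_frequency (gaze_points : List (List (String × String))) (out : Int) : Prop := out = calculate_reread_frequency_alt gaze_points
instance (gaze_points : List (List (String × String))) (out : Int) : Decidable (Spec_calculate_reread_frequency gaze_points out) := by unfold Spec_calculate_reread_frequency; infer_instance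

-- ===== CLAIM (what is proved, stated in full; the proofs are below) =====
def Claim_equal_calculate_reread_frequency : Prop := ∀ (gaze_points : List (List (String × String))), Dom_calculate_reread_frequency gaze_points → Spec_calculate_reread_frequency gaze_points (calculate_reread_frequency gaze_points)

-- ===== LEMMAS AND PROOFS =====

-- A's loop step, as a function of the already-extracted AOI value
def pvStep (s : List String × Int) (aoi : String) : List String × Int :=
  if aoi ∈ s.1 then (s.1, s.2 + 1) else (s.1 ++ [aoi], s.2)

-- A's fold over gaze points equals a fold of pvStep over the filtered AOI list
theorem pvFold_eq_filter (gps : List (List (String × String))) (s : List String × Int) :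
    gps.foldl
      (fun (s : List String × Int) point =>
        let aoi := (PySem.Dict.mk point).getD "aoi" "NONE"
        if aoi = "NONE" then s
        else if aoi ∈ s.1 then (s.1, s.2 + 1)
        else (s.1 ++ [aoi], s.2))
      s
    = ((gps.map (fun p => (PySem.Dict.mk p).getD "aoi" "NONE")).filter
        (fun a => a ≠ "NONE")).foldl pvStep s := by
  induction gps generalizing s with
  | nil => rfl
  | cons p rest ih =>
    simp only [List.foldl_cons, List.map_cons, List.filter_cons]
    by_cases h : (PySem.Dict.mk p).getD "aoi" "NONE" = "NONE"
    · simp [h, ih]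
    · simp [h, ih, pvStep]

-- invariant: the counter counts observations minus newly-discovered distinct AOIs
theorem pvStep_invariant (aois : List String) (v : List String) (c : Int) :
    (aois.foldl pvStep (v, c)).2
      = c + (aois.length : Int)
        - (((PySem.Set.update v aois).length : Int) - (v.length : Int)) := by
  induction aois generalizing v c with
  | nil =>
    simp [PySem.Set.update]
  | cons a rest ih =>
    by_cases h : a ∈ v
    · have hadd : PySem.Set.add v a = v := by
        simp [PySem.Set.add, PySem.Set.contains, h]
      simp only [List.foldl_cons, pvStep, h, if_pos, PySem.Set.update, hadd] at *
      rw [ih]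
      simp
      ring
    · have hadd : PySem.Set.add v a = v ++ [a] := by
        simp [PySem.Set.add, PySem.Set.contains, h]
      simp only [List.foldl_cons, pvStep, h, if_false, PySem.Set.update, hadd] at *
      rw [ih]
      simp
      ring

-- ===== VERDICT (by name: the statement is the Claim_ definition above) =====
theorem calculate_reread_frequency_spec : Claim_equal_calculate_reread_frequency := by
  intro gps _
  unfold Spec_calculate_reread_frequency calculate_reread_frequency calculate_reread_frequency_alt
  set aois := (gps.map (fun p => (PySem.Dict.mk p).getD "aoi" "NONE")).filter
      (fun a => a ≠ "NONE") with haois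
  by_cases hlen : gps.length < 2
  · -- the < 2 guard is redundant: at most one valid AOI gives 0 either way
    rw [if_pos hlen]
    have hle : aois.length ≤ 1 := by
      rw [haois]
      refine le_trans (List.length_filter_le _ _) ?_
      rw [List.length_map]; omega
    interval_cases h : aois.length
    · rw [List.length_eq_zero_iff] at h
      simp [h, PySem.Set.ofList]
    · obtain ⟨a, ha⟩ := List.length_eq_one_iff.mp h
      simp [ha, PySem.Set.ofList, PySem.Set.add, PySem.Set.contains, PySem.Set.empty]
  · rw [if_neg hlen, pvFold_eq_filter, ← haois]
    have := pvStep_invariant aois [] 0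
    rw [this]
    have hof : PySem.Set.update [] aois = PySem.Set.ofList aois := rfl
    rw [hof]
    simp
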